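-- pv_equiv track=rewrite | github.com/Tracyold/cuttingcorners | frontend/scripts/inject.py | capitalize_base
-- ===== SOURCE A (Python) =====
-- WORDS = [
--     ('dtail', 'Detail'),
--     ('front', 'frontend'),
--     ('port',  'portfolio'),
--     ('usrs',  'users'),
--     ('ind',  'index'),
--     ('comp',  'components'),
--     ('inq',   'Inquiry'),
--     ('inv',   'Invoice'),
--     ('res',   'Results'),
--     ('ord',   'Order'),
--     ('wig',   'Widget'),
--     ('mod',   'Modal'),
--     ('acc',   'account'),
--     ('shp',   'shop'),
--     ('int',   'intro'),
--     ('scr',   'screen'),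
--     ('sty',   'styles'),
--     ('lib',   'lib'),
--     ('hook',  'hooks'),
--     ('CP',    'ChatPanel'),
--     ('wiz',   'Wizard'),   # capital W
--     ('wz',    'wizard'),   # lowercase
--     ('pg',    'pages'),
--     ('fs',    'feasibility'),
--     ('ck',    'check'),
-- ]
--
-- def tokenize_list(seg: str) -> list:
--     """Greedily expand a shorthand segment into a list of full words."""
--     result, s = [], seg
--     while s:
--         matched = False
--         for short, full in WORDS:
--             if s.startswith(short):
--                 result.append(full); s = s[len(short):]; matched = True; break
--         if not matched:
--             result.append(s[0]); s = s[1:]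
--     return result
--
-- def capitalize_base(seg: str, folder_ctx: str, ext: str = '') -> str:
--     """
--     Expand and capitalize a base name.
--     pages/styles/.css → kebab lowercase
--     All others: combined → PascalCase, dashed → kebab
--     """
--     is_lower = folder_ctx in ('pages', 'styles') or ext in ('.css', '.scss')
--     if '-' in seg:
--         return '-'.join((tokenize_list(p) or [p])[0].lower() for p in seg.split('-'))
--     words = tokenize_list(seg)
--     if len(words) > 1:
--         return '-'.join(w.lower() for w in words) if is_lower else ''.join(w[0].upper() + w[1:] for w in words)
--     word = words[0] if words else seg
--     return word.lower() if is_lower else word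
-- ===== SOURCE B (Python) =====
-- # B: tokenization descends a character trie built once from WORDS (the shorthands are
-- # prefix-free, so the unique trie match equals A's first startswith match), and the
-- # outer function is decomposed into explicit accumulator loops / early returns.
--
-- WORDS = [
--     ('dtail', 'Detail'),
--     ('front', 'frontend'),
--     ('port',  'portfolio'),
--     ('usrs',  'users'),
--     ('ind',  'index'),
--     ('comp',  'components'),
--     ('inq',   'Inquiry'),
--     ('inv',   'Invoice'),
--     ('res',   'Results'),
--     ('ord',   'Order'),
--     ('wig',   'Widget'),
--     ('mod',   'Modal'),
--     ('acc',   'account'),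
--     ('shp',   'shop'),
--     ('int',   'intro'),
--     ('scr',   'screen'),
--     ('sty',   'styles'),
--     ('lib',   'lib'),
--     ('hook',  'hooks'),
--     ('CP',    'ChatPanel'),
--     ('wiz',   'Wizard'),
--     ('wz',    'wizard'),
--     ('pg',    'pages'),
--     ('fs',    'feasibility'),
--     ('ck',    'check'),
-- ]
--
--
-- def _build(pairs):
--     """Trie node from (remaining-key, full-word) pairs; '' key carries the payload."""
--     node = {}
--     empties = [full for short, full in pairs if short == '']
--     if empties:
--         node[''] = empties[0]
--     firsts = []
--     for short, _full in pairs: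
--         if short and short[0] not in firsts:
--             firsts.append(short[0])
--     for c in firsts:
--         node[c] = _build([(short[1:], full) for short, full in pairs if short and short[0] == c])
--     return node
--
--
-- _TRIE = _build(WORDS)
--
--
-- def _match(s, i):
--     """Descend the trie from position i; return (full_word, next_index) or None."""
--     node = _TRIE
--     j = i
--     while True:
--         if '' in node:
--             return node[''], j
--         if j < len(s) and s[j] in node:
--             node = node[s[j]]
--             j += 1
--         else:
--             return None
--
--
-- def _tokens(seg):
--     out, i, n = [], 0, len(seg)
--     while i < n:
--         m = _match(seg, i)
--         if m is None:
--             out.append(seg[i])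
--             i += 1
--         else:
--             out.append(m[0])
--             i = m[1]
--     return out
--
--
-- def capitalize_base(seg: str, folder_ctx: str, ext: str = '') -> str:
--     lower = folder_ctx in ('pages', 'styles') or ext in ('.css', '.scss')
--     if '-' in seg:
--         heads = []
--         for p in seg.split('-'):
--             ts = _tokens(p)
--             heads.append((ts[0] if ts else p).lower())
--         return '-'.join(heads)
--     ts = _tokens(seg)
--     if not ts:
--         return seg.lower() if lower else seg
--     if len(ts) == 1:
--         return ts[0].lower() if lower else ts[0]
--     if lower:
--         return '-'.join(t.lower() for t in ts)
--     out = []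
--     for t in ts:
--         out.append(t[:1].upper() + t[1:])
--     return ''.join(out)
-- ===== Notes on version B (the rewrite author's own statement) =====
-- stated objective: faster
-- what changed: tokenization descends a character trie built once from WORDS instead of re-scanning all 25 startswith keys at every position (the shorthands are prefix-free, so the unique trie match equals A's first match), and the outer function is restructured into explicit accumulator loops and early returns instead of A's join-of-generator expressions.
import Mathlib
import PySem

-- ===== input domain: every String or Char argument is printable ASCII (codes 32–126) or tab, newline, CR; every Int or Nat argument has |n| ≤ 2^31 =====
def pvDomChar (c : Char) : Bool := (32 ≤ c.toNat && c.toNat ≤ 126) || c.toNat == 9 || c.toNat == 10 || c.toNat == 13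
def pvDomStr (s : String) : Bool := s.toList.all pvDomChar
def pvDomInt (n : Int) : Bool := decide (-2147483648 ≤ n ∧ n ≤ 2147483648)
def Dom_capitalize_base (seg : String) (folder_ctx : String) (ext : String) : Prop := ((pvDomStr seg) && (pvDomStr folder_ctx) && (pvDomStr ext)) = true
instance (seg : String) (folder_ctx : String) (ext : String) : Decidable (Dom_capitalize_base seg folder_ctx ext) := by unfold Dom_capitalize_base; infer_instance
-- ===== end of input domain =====

-- B tokenizes by descending a character trie built once from WORDS (faster by a constant
-- factor: no per-position scan of all 25 shorthands) and restructures the outer function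
-- into explicit accumulator loops and early returns.

-- ===== PORT A =====

-- A's module constant WORDS (shorthands and expansions as char lists)
def WORDSL : List (List Char × List Char) := [
  (['d', 't', 'a', 'i', 'l'], ['D', 'e', 't', 'a', 'i', 'l']),
  (['f', 'r', 'o', 'n', 't'], ['f', 'r', 'o', 'n', 't', 'e', 'n', 'd']),
  (['p', 'o', 'r', 't'], ['p', 'o', 'r', 't', 'f', 'o', 'l', 'i', 'o']),
  (['u', 's', 'r', 's'], ['u', 's', 'e', 'r', 's']),
  (['i', 'n', 'd'], ['i', 'n', 'd', 'e', 'x']),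
  (['c', 'o', 'm', 'p'], ['c', 'o', 'm', 'p', 'o', 'n', 'e', 'n', 't', 's']),
  (['i', 'n', 'q'], ['I', 'n', 'q', 'u', 'i', 'r', 'y']),
  (['i', 'n', 'v'], ['I', 'n', 'v', 'o', 'i', 'c', 'e']),
  (['r', 'e', 's'], ['R', 'e', 's', 'u', 'l', 't', 's']),
  (['o', 'r', 'd'], ['O', 'r', 'd', 'e', 'r']),
  (['w', 'i', 'g'], ['W', 'i', 'd', 'g', 'e', 't']),
  (['m', 'o', 'd'], ['M', 'o', 'd', 'a', 'l']),
  (['a', 'c', 'c'], ['a', 'c', 'c', 'o', 'u', 'n', 't']),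
  (['s', 'h', 'p'], ['s', 'h', 'o', 'p']),
  (['i', 'n', 't'], ['i', 'n', 't', 'r', 'o']),
  (['s', 'c', 'r'], ['s', 'c', 'r', 'e', 'e', 'n']),
  (['s', 't', 'y'], ['s', 't', 'y', 'l', 'e', 's']),
  (['l', 'i', 'b'], ['l', 'i', 'b']),
  (['h', 'o', 'o', 'k'], ['h', 'o', 'o', 'k', 's']),
  (['C', 'P'], ['C', 'h', 'a', 't', 'P', 'a', 'n', 'e', 'l']),
  (['w', 'i', 'z'], ['W', 'i', 'z', 'a', 'r', 'd']),
  (['w', 'z'], ['w', 'i', 'z', 'a', 'r', 'd']),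
  (['p', 'g'], ['p', 'a', 'g', 'e', 's']),
  (['f', 's'], ['f', 'e', 'a', 's', 'i', 'b', 'i', 'l', 'i', 't', 'y']),
  (['c', 'k'], ['c', 'h', 'e', 'c', 'k'])]

-- the inner `for short, full in WORDS: if s.startswith(short): … break` loop of A's tokenize_list
def scanA : List (List Char × List Char) → List Char → Option (List Char × List Char)
  | [], _ => none
  | (short, full) :: ws, s =>
      if short.isPrefixOf s then some (full, s.drop short.length) else scanA ws s

-- A's tokenize_list: greedy while loop, first match in WORDS or single-char fallback.
-- (The Nat argument is fuel making the loop total; every iteration consumes at least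
-- one character, so fuel = len(s) never runs out — exactly the Python while loop.)
def tokAF : Nat → List Char → List (List Char)
  | _, [] => []
  | 0, _ :: _ => []
  | fuel + 1, c :: rest =>
      match scanA WORDSL (c :: rest) with
      | some (full, rem) => full :: tokAF fuel rem
      | none => [c] :: tokAF fuel rest

def tokenizeA (s : List Char) : List (List Char) := tokAF s.length s

-- w[0].upper() + w[1:]  (tokens are never empty, so the [] branch is unreachable)
def capWord (w : List Char) : List Char :=
  match w with
  | [] => []
  | c :: r => PySem.Chars.upperChar c :: r

def capitalize_base (seg : String) (folder_ctx : String) (ext : String) : String :=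
  let is_lower := (folder_ctx == "pages" || folder_ctx == "styles")
                  || (ext == ".css" || ext == ".scss")
  let s := seg.toList
  if PySem.Chars.isIn ['-'] s then
    String.ofList (PySem.Chars.join ['-'] ((PySem.Chars.splitOn s ['-']).map (fun p =>
      match tokenizeA p with
      | [] => PySem.Chars.lower p
      | w :: _ => PySem.Chars.lower w)))
  else
    let words := tokenizeA s
    if words.length > 1 then
      if is_lower then String.ofList (PySem.Chars.join ['-'] (words.map PySem.Chars.lower))
      else String.ofList (PySem.Chars.join [] (words.map capWord))
    else
      let word := match words with | [] => s | w :: _ => w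
      String.ofList (if is_lower then PySem.Chars.lower word else word)

-- ===== PORT B =====

-- B's module constant WORDS, as the Python string pairs
def WORDSB : List (String × String) := [
  ("dtail", "Detail"), ("front", "frontend"), ("port", "portfolio"),
  ("usrs", "users"), ("ind", "index"), ("comp", "components"),
  ("inq", "Inquiry"), ("inv", "Invoice"), ("res", "Results"),
  ("ord", "Order"), ("wig", "Widget"), ("mod", "Modal"),
  ("acc", "account"), ("shp", "shop"), ("int", "intro"),
  ("scr", "screen"), ("sty", "styles"), ("lib", "lib"),
  ("hook", "hooks"), ("CP", "ChatPanel"), ("wiz", "Wizard"),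
  ("wz", "wizard"), ("pg", "pages"), ("fs", "feasibility"), ("ck", "check")]

-- a character trie: payload at terminal nodes, children as an explicit assoc structure
mutual
inductive Trie : Type where
  | mk : Option (List Char) → Children → Trie
inductive Children : Type where
  | nil : Children
  | cons : Char → Trie → Children → Children
end

-- [(short[1:], full) for short, full in pairs if short and short[0] == c]
def bucket (c : Char) (ps : List (List Char × List Char)) : List (List Char × List Char) :=
  ps.filterMap (fun p =>
    match p.1 with
    | [] => none
    | c' :: k => if c' = c then some (k, p.2) else none)

-- the `firsts` accumulation loop of _build
def firsts (ps : List (List Char × List Char)) : List Char :=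
  ps.foldl (fun acc p =>
    match p.1 with
    | [] => acc
    | c :: _ => if c ∈ acc then acc else acc ++ [c]) []

-- the `for c in firsts: node[c] = _build(...)` loop: one child entry per first char
def toChildren : List (Char × Trie) → Children
  | [] => .nil
  | (c, t) :: rest => .cons c t (toChildren rest)

-- _build(pairs): payload from the first empty key, one child per distinct first char.
-- (The Nat argument is fuel making the recursion total; with fuel above the longest
-- shorthand it never runs out, exactly like the Python recursion on shrinking keys.)
def ofList : Nat → List (List Char × List Char) → Trie
  | 0, _ => .mk none .nil
  | fuel + 1, ps =>
      .mk ((ps.find? (fun p => p.1.isEmpty)).map Prod.snd)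
          (toChildren ((firsts ps).map (fun c => (c, ofList fuel (bucket c ps)))))

def TRIE : Trie := ofList 6 (WORDSB.map (fun p => (p.1.toList, p.2.toList)))

def childGet : Children → Char → Option Trie
  | .nil, _ => none
  | .cons c t rest, x => if x = c then some t else childGet rest x

-- B's _match: descend the trie, returning the payload and the remaining characters
def descend : Trie → List Char → Option (List Char × List Char)
  | .mk (some full) _, s => some (full, s)
  | .mk none _, [] => none
  | .mk none ch, c :: rest =>
      match childGet ch c with
      | some t' => descend t' rest
      | none => none

-- B's _tokens: the greedy while loop over the trie
-- (fuel = len(seg) exactly as in tokAF: a trie match always consumes ≥ 1 character)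
def tokBF : Nat → List Char → List (List Char)
  | _, [] => []
  | 0, _ :: _ => []
  | fuel + 1, c :: rest =>
      match descend TRIE (c :: rest) with
      | some (full, rem) => full :: tokBF fuel rem
      | none => [c] :: tokBF fuel rest

def tokenizeB (s : List Char) : List (List Char) := tokBF s.length s

-- t[:1].upper() + t[1:]
def capHead (t : List Char) : List Char :=
  PySem.Chars.upper (t.take 1) ++ t.drop 1

def capitalize_base_alt (seg : String) (folder_ctx : String) (ext : String) : String :=
  let lower := (folder_ctx == "pages" || folder_ctx == "styles")
               || (ext == ".css" || ext == ".scss")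
  let s := seg.toList
  if PySem.Chars.isIn ['-'] s then
    -- heads = []; for p in seg.split('-'): heads.append((ts[0] if ts else p).lower())
    String.ofList (PySem.Chars.join ['-']
      ((PySem.Chars.splitOn s ['-']).foldl (fun heads p =>
        heads ++ [PySem.Chars.lower (match tokenizeB p with | [] => p | w :: _ => w)]) []))
  else
    match tokenizeB s with
    | [] => String.ofList (if lower then PySem.Chars.lower s else s)
    | [t] => String.ofList (if lower then PySem.Chars.lower t else t)
    | ts =>
        if lower then String.ofList (PySem.Chars.join ['-'] (ts.map PySem.Chars.lower))
        else
          -- out = []; for t in ts: out.append(t[:1].upper() + t[1:])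
          String.ofList (PySem.Chars.join []
            (ts.foldl (fun out t => out ++ [capHead t]) []))

-- ===== PRECONDITION & SPEC =====
def Spec_capitalize_base (seg : String) (folder_ctx : String) (ext : String) (out : String) : Prop := out = capitalize_base_alt seg folder_ctx ext
instance (seg : String) (folder_ctx : String) (ext : String) (out : String) : Decidable (Spec_capitalize_base seg folder_ctx ext out) := by unfold Spec_capitalize_base; infer_instance

-- ===== CLAIM (what is proved, stated in full; the proofs are below) =====
def Claim_equal_capitalize_base : Prop := ∀ (seg : String) (folder_ctx : String) (ext : String), Dom_capitalize_base seg folder_ctx ext → Spec_capitalize_base seg folder_ctx ext (capitalize_base seg folder_ctx ext)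

-- ===== LEMMAS AND PROOFS =====

-- A's scan is the first WORDS entry whose shorthand is a prefix
theorem scanA_eq_find (ws : List (List Char × List Char)) (s : List Char) :
    scanA ws s = (ws.find? (fun p => p.1.isPrefixOf s)).map (fun p => (p.2, s.drop p.1.length)) := by
  induction ws with
  | nil => simp [scanA]
  | cons p ws ih =>
      obtain ⟨short, full⟩ := p
      simp only [scanA, List.find?]
      by_cases hp : short.isPrefixOf s
      · simp [hp]
      · simp [hp, ih]

-- prefix-freeness: no shorthand is a prefix of another
def PF (ps : List (List Char × List Char)) : Prop :=
  ps.Pairwise (fun p q => ¬ p.1 <+: q.1 ∧ ¬ q.1 <+: p.1)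

-- B's string table is (characterwise) A's table
theorem WORDSB_toList : WORDSB.map (fun p => (p.1.toList, p.2.toList)) = WORDSL := by
  decide

theorem PF_WORDSL : PF WORDSL := by
  unfold PF WORDSL
  decide

theorem PF_bucket (c : Char) (ps : List (List Char × List Char)) (h : PF ps) :
    PF (bucket c ps) := by
  unfold PF bucket
  refine List.Pairwise.filterMap _ ?_ h
  intro a a' hR b hb b' hb'
  obtain ⟨ka, va⟩ := a
  obtain ⟨ka', va'⟩ := a'
  cases ka with
  | nil => simp at hb
  | cons ca k =>
      cases ka' with
      | nil => simp at hb'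
      | cons ca' k' =>
          simp only at hb hb'
          split at hb
          · split at hb'
            · rename_i hca hca'
              subst hca hca'
              obtain rfl : (k, va) = b := Option.some.inj hb
              obtain rfl : (k', va') = b' := Option.some.inj hb'
              constructor
              · intro hpre
                exact hR.1 (List.cons_prefix_cons.mpr ⟨rfl, hpre⟩)
              · intro hpre
                exact hR.2 (List.cons_prefix_cons.mpr ⟨rfl, hpre⟩)
            · simp at hb'
          · simp at hb

theorem mem_firsts_aux :
    ∀ (ps : List (List Char × List Char)) (acc : List Char) (c : Char),
      c ∈ ps.foldl (fun acc p =>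
        match p.1 with
        | [] => acc
        | c :: _ => if c ∈ acc then acc else acc ++ [c]) acc ↔
      c ∈ acc ∨ ∃ p ∈ ps, ∃ k, p.1 = c :: k := by
  intro ps
  induction ps with
  | nil => intro acc c; simp
  | cons p t ih =>
      intro acc c
      simp only [List.foldl_cons]
      rw [ih]
      obtain ⟨kp, vp⟩ := p
      cases kp with
      | nil => simp
      | cons c0 k0 =>
          simp only
          constructor
          · rintro (hacc | hrest)
            · split at hacc
              · exact Or.inl hacc
              · rcases List.mem_append.mp hacc with h1 | h1
                · exact Or.inl h1
                · simp at h1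
                  exact Or.inr ⟨(c0 :: k0, vp), by simp, k0, by rw [h1]⟩
            · obtain ⟨q, hq, k, hk⟩ := hrest
              exact Or.inr ⟨q, by simp [hq], k, hk⟩
          · rintro (hacc | ⟨q, hq, k, hk⟩)
            · left; split
              · exact hacc
              · exact List.mem_append.mpr (Or.inl hacc)
            · rcases List.mem_cons.mp hq with rfl | hq'
              · simp only at hk
                have h1 : c0 = c := by
                  have := congrArg List.head? hk
                  simpa using this
                subst h1
                left
                split
                · assumption
                · exact List.mem_append.mpr (Or.inr (by simp))
              · right; exact ⟨q, hq', k, hk⟩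

theorem mem_firsts (c : Char) (ps : List (List Char × List Char)) :
    c ∈ firsts ps ↔ ∃ p ∈ ps, ∃ k, p.1 = c :: k := by
  unfold firsts
  rw [mem_firsts_aux]
  simp

theorem find?_empty_singleton (ps : List (List Char × List Char)) (pv : List Char × List Char)
    (hP : ps.find? (fun p => p.1.isEmpty) = some pv) (hpf : PF ps) :
    ps = [pv] ∧ pv.1 = [] := by
  cases ps with
  | nil => simp at hP
  | cons p t =>
      rw [List.find?_cons] at hP
      split at hP
      · rename_i hpe
        have hppv : p = pv := Option.some.inj hP
        have hp1 : p.1 = [] := by simpa [List.isEmpty_iff] using hpe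
        have hpv : pv.1 = [] := by rw [← hppv]; exact hp1
        cases t with
        | nil => exact ⟨by rw [hppv], hpv⟩
        | cons q t' =>
            exfalso
            have := (List.pairwise_cons.mp hpf).1 q (by simp)
            exact this.1 (hp1 ▸ List.nil_prefix)
      · rename_i hpe
        exfalso
        have hmem := List.mem_of_find?_eq_some hP
        have hpv : pv.1 = [] := by
          have := List.find?_some hP
          simpa [List.isEmpty_iff] using this
        have := (List.pairwise_cons.mp hpf).1 pv hmem
        exact this.2 (hpv ▸ List.nil_prefix)

theorem childGet_toChildren (g : Char → Trie) (fs : List Char) (c : Char) :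
    childGet (toChildren (fs.map (fun c => (c, g c)))) c =
      if c ∈ fs then some (g c) else none := by
  induction fs with
  | nil => simp [toChildren, childGet]
  | cons c' cs ih =>
      simp only [List.map_cons, toChildren, childGet, List.mem_cons]
      by_cases hc : c = c'
      · subst hc; simp
      · simp [hc, ih]

theorem find?_bucket (c : Char) (rest : List Char) (ps : List (List Char × List Char))
    (hne : ∀ p ∈ ps, p.1 ≠ []) :
    (ps.find? (fun p => p.1.isPrefixOf (c :: rest))).map (fun p => (p.2, (c :: rest).drop p.1.length))
      = ((bucket c ps).find? (fun p => p.1.isPrefixOf rest)).map (fun p => (p.2, rest.drop p.1.length)) := by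
  induction ps with
  | nil => simp [bucket]
  | cons p t ih =>
      have hne' : ∀ q ∈ t, q.1 ≠ [] := fun q hq => hne q (by simp [hq])
      obtain ⟨k, v⟩ := p
      cases k with
      | nil => exact absurd rfl (hne ([], v) (by simp))
      | cons c' k' =>
          by_cases hc : c' = c
          · subst hc
            have hb : bucket c' ((c' :: k', v) :: t) = (k', v) :: bucket c' t := by
              simp [bucket]
            rw [hb]
            simp only [List.find?_cons]
            by_cases hpre : k'.isPrefixOf rest
            · have : (c' :: k').isPrefixOf (c' :: rest) = true := by
                simp [List.isPrefixOf_iff_prefix]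
                exact List.isPrefixOf_iff_prefix.mp hpre
              simp only [this, hpre]
              simp
            · have : (c' :: k').isPrefixOf (c' :: rest) = false := by
                rw [Bool.eq_false_iff]
                intro hcon
                exact hpre (List.isPrefixOf_iff_prefix.mpr
                  (List.cons_prefix_cons.mp (List.isPrefixOf_iff_prefix.mp hcon)).2)
              rw [this]
              have hpre' : (k'.isPrefixOf rest) = false := Bool.eq_false_iff.mpr hpre
              rw [hpre']
              simpa using ih hne'
          · have hb : bucket c ((c' :: k', v) :: t) = bucket c t := by
              simp [bucket, hc]
            have hfail : (c' :: k').isPrefixOf (c :: rest) = false := by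
              rw [Bool.eq_false_iff]
              intro hcon
              exact hc (List.cons_prefix_cons.mp (List.isPrefixOf_iff_prefix.mp hcon)).1
            rw [hb]
            simp only [List.find?_cons, hfail]
            simpa using ih hne'

theorem descend_ofList : ∀ (fuel : Nat) (ps : List (List Char × List Char)) (s : List Char),
    (∀ p ∈ ps, p.1.length < fuel) → PF ps →
    descend (ofList fuel ps) s
      = (ps.find? (fun p => p.1.isPrefixOf s)).map (fun p => (p.2, s.drop p.1.length)) := by
  intro fuel
  induction fuel with
  | zero =>
      intro ps s hlen _
      have hps : ps = [] := by
        cases ps with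
        | nil => rfl
        | cons p t => exact absurd (hlen p (by simp)) (by omega)
      subst hps
      rw [ofList]
      cases s with
      | nil => rfl
      | cons c rest => simp [descend, childGet]
  | succ fuel ih =>
      intro ps s hlen hpf
      rw [ofList]
      cases hP : ps.find? (fun p => p.1.isEmpty) with
      | some pv =>
          obtain ⟨hps, hpv⟩ := find?_empty_singleton ps pv hP hpf
          subst hps
          obtain ⟨k0, v0⟩ := pv
          obtain rfl : k0 = [] := hpv
          simp only [Option.map_some]
          rw [descend]
          simp
      | none =>
          have hne : ∀ p ∈ ps, p.1 ≠ [] := by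
            intro p hp
            have := List.find?_eq_none.mp hP p hp
            simpa [List.isEmpty_iff] using this
          simp only [Option.map_none]
          cases s with
          | nil =>
              have hfind : ps.find? (fun p => p.1.isPrefixOf ([] : List Char)) = none := by
                rw [List.find?_eq_none]
                intro p hp
                intro hcon
                exact hne p hp (List.prefix_nil.mp (List.isPrefixOf_iff_prefix.mp hcon))
              rw [descend, hfind]
              rfl
          | cons c rest =>
              rw [descend]
              rw [childGet_toChildren]
              by_cases hcf : c ∈ firsts ps
              · rw [if_pos hcf]
                show descend (ofList fuel (bucket c ps)) rest = _
                have hlen' : ∀ q ∈ bucket c ps, q.1.length < fuel := by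
                  intro q hq
                  obtain ⟨p, hp, hpq⟩ := List.mem_filterMap.mp hq
                  obtain ⟨kp, vp⟩ := p
                  cases kp with
                  | nil => simp at hpq
                  | cons cp k =>
                      simp only at hpq
                      split at hpq
                      · obtain rfl : (k, vp) = q := Option.some.inj hpq
                        have := hlen (cp :: k, vp) hp
                        simp at this ⊢
                        omega
                      · simp at hpq
                rw [ih (bucket c ps) rest hlen' (PF_bucket c ps hpf)]
                exact (find?_bucket c rest ps hne).symm
              · rw [if_neg hcf]
                show (none : Option (List Char × List Char)) = _
                have hfind : ps.find? (fun p => p.1.isPrefixOf (c :: rest)) = none := by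
                  rw [List.find?_eq_none]
                  intro p hp
                  intro hcon
                  obtain ⟨kp, vp⟩ := p
                  cases kp with
                  | nil => exact hne ([], vp) hp rfl
                  | cons cp k =>
                      have hcp : cp = c :=
                        (List.cons_prefix_cons.mp (List.isPrefixOf_iff_prefix.mp hcon)).1
                      exact hcf ((mem_firsts c ps).mpr ⟨(cp :: k, vp), hp, k, by rw [hcp]⟩)
                rw [hfind]
                rfl

-- with prefix-free WORDS the unique trie match is A's first list match
theorem descend_TRIE_eq (s : List Char) : descend TRIE s = scanA WORDSL s := by
  rw [scanA_eq_find]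
  show descend (ofList 6 (WORDSB.map (fun p => (p.1.toList, p.2.toList)))) s = _
  rw [WORDSB_toList]
  exact descend_ofList 6 WORDSL s (by decide) PF_WORDSL

theorem tokF_eq : ∀ (fuel : Nat) (s : List Char), tokAF fuel s = tokBF fuel s := by
  intro fuel
  induction fuel with
  | zero =>
      intro s
      cases s with
      | nil => rfl
      | cons c rest => rfl
  | succ fuel ih =>
      intro s
      cases s with
      | nil => rfl
      | cons c rest =>
          rw [tokAF, tokBF, descend_TRIE_eq]
          cases h : scanA WORDSL (c :: rest) with
          | some fr =>
              obtain ⟨full, rem⟩ := fr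
              show full :: tokAF fuel rem = full :: tokBF fuel rem
              rw [ih]
          | none =>
              show [c] :: tokAF fuel rest = [c] :: tokBF fuel rest
              rw [ih]

theorem tokenize_eq (s : List Char) : tokenizeB s = tokenizeA s := by
  unfold tokenizeA tokenizeB
  exact (tokF_eq s.length s).symm

-- the append-accumulator loop is a map
theorem foldl_push {α β : Type} (g : α → β) :
    ∀ (l : List α) (acc : List β), l.foldl (fun a x => a ++ [g x]) acc = acc ++ l.map g := by
  intro l
  induction l with
  | nil => intro acc; simp
  | cons x t ih => intro acc; simp [ih]

-- t[:1].upper() + t[1:] = t[0].upper() + t[1:] on nonempty t (and both are [] on empty)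
theorem capHead_eq (t : List Char) : capHead t = capWord t := by
  cases t with
  | nil => rfl
  | cons c r => simp [capHead, capWord, PySem.Chars.upper]

-- lower() commutes with the first-token-or-part selection of the dash branch
theorem dashElem (p : List Char) :
    PySem.Chars.lower (match tokenizeA p with | [] => p | w :: _ => w)
      = (match tokenizeA p with
         | [] => PySem.Chars.lower p
         | w :: _ => PySem.Chars.lower w) := by
  cases tokenizeA p <;> rfl

-- ===== VERDICT (by name: the statement is the Claim_ definition above) =====
theorem capitalize_base_spec : Claim_equal_capitalize_base := by
  intro seg folder_ctx ext _
  unfold Spec_capitalize_base capitalize_base capitalize_base_alt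
  simp only [tokenize_eq, foldl_push, List.nil_append, capHead_eq, dashElem]
  cases h : tokenizeA seg.toList with
  | nil => rfl
  | cons w tail =>
      cases tail with
      | nil => rfl
      | cons x r => rfl
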